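-- pv_equiv track=rewrite | github.com/Arsen1302/Code-copy-detector | TestData/solutions/problem_1664_1.py | solution_1664_1
-- ===== SOURCE A (Python) =====
-- def solution_1664_1(s: str) -> int:
--     cur = set()
--     res = 1
--
--     for c in s:
--         if c in cur:
--             cur = set()
--             res += 1
--         cur.add(c)
--
--     return res
-- ===== SOURCE B (Python) =====
-- def solution_1664_1(s: str) -> int:
--     # Segment-at-a-time: repeatedly locate the first position k whose character
--     # already occurs in the preceding prefix s[:k]; cut there and continue on s[k:].
--     res = 1
--     while True:
--         cut = None
--         for k in range(len(s)):
--             if s[k] in s[:k]: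
--                 cut = k
--                 break
--         if cut is None:
--             return res
--         res += 1
--         s = s[cut:]
-- ===== Notes on version B (the rewrite author's own statement) =====
-- stated objective: alternative
-- what changed: B counts segments one at a time: an outer loop repeatedly finds, by scanning indices k and testing s[k] in the prefix s[:k], the first position whose character repeats, cuts there and continues on the suffix s[k:]; no running set is maintained at all.
import Mathlib
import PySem

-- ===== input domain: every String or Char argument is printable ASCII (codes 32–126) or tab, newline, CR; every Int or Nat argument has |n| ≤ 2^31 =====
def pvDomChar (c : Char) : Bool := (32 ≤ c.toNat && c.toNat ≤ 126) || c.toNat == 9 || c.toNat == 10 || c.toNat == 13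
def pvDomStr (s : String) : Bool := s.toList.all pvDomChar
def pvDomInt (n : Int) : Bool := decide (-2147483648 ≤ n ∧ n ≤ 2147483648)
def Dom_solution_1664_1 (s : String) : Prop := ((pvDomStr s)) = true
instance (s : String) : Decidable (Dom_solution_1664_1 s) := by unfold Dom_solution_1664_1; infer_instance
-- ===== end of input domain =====

-- B is a segment-at-a-time re-decomposition: it repeatedly finds the first index whose
-- character occurs in the preceding prefix and cuts there; no running set is maintained.
-- ===== PORT A =====
-- for c in s: if c in cur: cur = set(); res += 1; then cur.add(c)
def pvALoop : List Char → PySem.Set Char → Int → Int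
  | [], _, res => res
  | c :: rest, cur, res =>
    if c ∈ cur then pvALoop rest (PySem.Set.add PySem.Set.empty c) (res + 1)
    else pvALoop rest (PySem.Set.add cur c) res

def solution_1664_1 (s : String) : Int := pvALoop s.toList PySem.Set.empty 1

-- ===== PORT B =====
-- inner loop: for k in range(len(s)): if s[k] in s[:k]: cut = k; break   (none if no k found)
-- (every k supplied by the range is < len(s), so getD's default is never consulted: s[k] is exact)
def pvBFindLoop (l : List Char) : List Nat → Option Nat
  | [] => none
  | k :: ks => if l.getD k default ∈ l.take k then some k else pvBFindLoop l ks

def pvBFind (l : List Char) : Option Nat := pvBFindLoop l (List.range l.length)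

-- outer loop: while True: cut = find; if cut is None: return res; res += 1; s = s[cut:]
-- (fuel = |s| is a pure totality guard: every iteration removes at least one character,
--  so the loop body runs at most |s| times and the guard never alters the result)
def pvBLoop : Nat → List Char → Int → Int
  | 0, _, res => res
  | fuel + 1, l, res =>
    match pvBFind l with
    | some k => pvBLoop fuel (l.drop k) (res + 1)
    | none => res

def solution_1664_1_alt (s : String) : Int := pvBLoop s.toList.length s.toList 1

-- ===== PRECONDITION & SPEC =====
def Spec_solution_1664_1 (s : String) (out : Int) : Prop := out = solution_1664_1_alt s
instance (s : String) (out : Int) : Decidable (Spec_solution_1664_1 s out) := by unfold Spec_solution_1664_1; infer_instance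

-- ===== CLAIM (what is proved, stated in full; the proofs are below) =====
def Claim_equal_solution_1664_1 : Prop := ∀ (s : String), Dom_solution_1664_1 s → Spec_solution_1664_1 s (solution_1664_1 s)

-- ===== LEMMAS AND PROOFS =====

-- Common reference function: greedy cut with an explicit seen-list.
def pvF : List Char → List Char → Int
  | _, [] => 1
  | seen, c :: rest => if c ∈ seen then 1 + pvF [c] rest else pvF (c :: seen) rest

theorem pvALoop_eq_F (l : List Char) : ∀ (cur : PySem.Set Char) (seen : List Char) (res : Int),
    (∀ c, c ∈ cur ↔ c ∈ seen) → pvALoop l cur res = res + pvF seen l - 1 := by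
  induction l with
  | nil => intro cur seen res _; simp [pvALoop, pvF]
  | cons c rest ih =>
    intro cur seen res h
    simp only [pvALoop, pvF]
    by_cases hc : c ∈ cur
    · rw [if_pos hc, if_pos ((h c).mp hc)]
      rw [ih _ [c] (res + 1) (by intro x; rw [PySem.Set.mem_add]; simp)]
      ring
    · rw [if_neg hc, if_neg (fun hx => hc ((h c).mpr hx))]
      apply ih
      intro x; rw [PySem.Set.mem_add]; simp [h x, or_comm]

theorem pvBFindLoop_none (l : List Char) (n : Nat) : ∀ k0 : Nat,
    pvBFindLoop l (List.range' k0 n) = none →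
    ∀ j, k0 ≤ j → j < k0 + n → l.getD j default ∉ l.take j := by
  induction n with
  | zero => intro k0 _ j h1 h2; omega
  | succ n ih =>
    intro k0 hf j h1 h2
    rw [List.range'_succ] at hf
    simp only [pvBFindLoop] at hf
    split at hf
    · exact absurd hf (by simp)
    · rename_i hmem
      rcases Nat.eq_or_lt_of_le h1 with he | hl
      · subst he; exact hmem
      · exact ih (k0 + 1) hf j hl (by omega)

theorem pvBFindLoop_some (l : List Char) (n : Nat) : ∀ k0 k : Nat,
    pvBFindLoop l (List.range' k0 n) = some k →
    k0 ≤ k ∧ k < k0 + n ∧ l.getD k default ∈ l.take k ∧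
      ∀ j, k0 ≤ j → j < k → l.getD j default ∉ l.take j := by
  induction n with
  | zero => intro k0 k hf; simp [pvBFindLoop] at hf
  | succ n ih =>
    intro k0 k hf
    rw [List.range'_succ] at hf
    simp only [pvBFindLoop] at hf
    split at hf
    · rename_i hmem
      cases hf
      exact ⟨le_refl _, by omega, hmem, fun j h1 h2 => by omega⟩
    · rename_i hmem
      obtain ⟨h1, h2, h3, h4⟩ := ih (k0 + 1) k hf
      refine ⟨by omega, by omega, h3, ?_⟩
      intro j hj1 hj2
      rcases Nat.eq_or_lt_of_le hj1 with he | hl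
      · subst he; exact hmem
      · exact h4 j hl hj2

theorem pvBFind_some (l : List Char) (k : Nat) (hf : pvBFind l = some k) :
    0 < k ∧ ∃ hk : k < l.length, l[k] ∈ l.take k ∧
      ∀ j, j < k → ∀ hj : j < l.length, l[j] ∉ l.take j := by
  unfold pvBFind at hf
  rw [List.range_eq_range'] at hf
  obtain ⟨-, h2, h3, h4⟩ := pvBFindLoop_some l l.length 0 k hf
  have hk : k < l.length := by omega
  rw [List.getD_eq_getElem l default hk] at h3
  have hkpos : 0 < k := by
    rcases Nat.eq_zero_or_pos k with h0 | h0
    · subst h0; simp at h3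
    · exact h0
  refine ⟨hkpos, hk, h3, ?_⟩
  intro j hj hjl
  have := h4 j (Nat.zero_le _) hj
  rwa [List.getD_eq_getElem l default hjl] at this

theorem pvBFind_none (l : List Char) (hf : pvBFind l = none) :
    ∀ j, ∀ hj : j < l.length, l[j] ∉ l.take j := by
  intro j hj
  unfold pvBFind at hf
  rw [List.range_eq_range'] at hf
  have := pvBFindLoop_none l l.length 0 hf j (Nat.zero_le _) (by omega)
  rwa [List.getD_eq_getElem l default hj] at this

-- pvF returns 1 when no character repeats (relative to seen).
theorem pvF_nodup (l : List Char) : ∀ seen : List Char,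
    (∀ k, ∀ hk : k < l.length, l[k] ∉ seen ∧ l[k] ∉ l.take k) → pvF seen l = 1 := by
  induction l with
  | nil => intros; rfl
  | cons c rest ih =>
    intro seen h
    have h0 := h 0 (by simp)
    simp only [pvF, List.getElem_cons_zero] at h0 ⊢
    rw [if_neg h0.1]
    apply ih
    intro k hk
    have hk1 := h (k + 1) (by simpa using Nat.succ_lt_succ hk)
    simp only [List.getElem_cons_succ, List.take_succ_cons] at hk1
    constructor
    · intro hx
      rcases List.mem_cons.mp hx with he | hs
      · exact hk1.2 (by simp [he])
      · exact hk1.1 hs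
    · intro hx; exact hk1.2 (List.mem_cons_of_mem _ hx)

-- pvF steps across a duplicate-free prefix up to the first repeat at index k and cuts there.
theorem pvF_skip (k : Nat) : ∀ (l seen : List Char) (hk : k < l.length),
    (l[k] ∈ seen ∨ l[k] ∈ l.take k) →
    (∀ j, ∀ hj : j < k, l[j]'(by omega) ∉ seen ∧ l[j]'(by omega) ∉ l.take j) →
    pvF seen l = 1 + pvF [l[k]] (l.drop (k + 1)) := by
  induction k with
  | zero =>
    intro l seen hk hmem _
    cases l with
    | nil => simp at hk
    | cons c rest =>
      simp only [List.getElem_cons_zero, List.take_zero, List.not_mem_nil, or_false] at hmem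
      simp [pvF, hmem]
  | succ k ih =>
    intro l seen hk hmem hpre
    cases l with
    | nil => simp at hk
    | cons c rest =>
      have h0 := hpre 0 (by omega)
      simp only [List.getElem_cons_zero] at h0
      simp only [pvF, if_neg h0.1]
      have hk' : k < rest.length := by simpa using Nat.lt_of_succ_lt_succ hk
      rw [ih rest (c :: seen) hk' ?_ ?_]
      · simp
      · have : (c :: rest)[k + 1] = rest[k] := List.getElem_cons_succ ..
        rw [this] at hmem
        simp only [List.take_succ_cons, List.mem_cons] at hmem
        rcases hmem with h | h
        · exact Or.inl (List.mem_cons_of_mem _ h)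
        · rcases h with he | hs
          · exact Or.inl (by simp [he])
          · exact Or.inr hs
      · intro j hj
        have hj1 := hpre (j + 1) (by omega)
        simp only [List.getElem_cons_succ, List.take_succ_cons] at hj1
        constructor
        · intro hx
          rcases List.mem_cons.mp hx with he | hs
          · exact hj1.2 (by simp [he])
          · exact hj1.1 hs
        · intro hx; exact hj1.2 (List.mem_cons_of_mem _ hx)

theorem pvBLoop_eq_F (fuel : Nat) : ∀ (l : List Char), l.length ≤ fuel → ∀ res : Int,
    pvBLoop fuel l res = res + pvF [] l - 1 := by
  induction fuel with
  | zero =>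
    intro l hl res
    have : l = [] := List.eq_nil_of_length_eq_zero (by omega)
    subst this
    simp only [pvBLoop, pvF]
    ring
  | succ fuel ih =>
    intro l hl res
    simp only [pvBLoop]
    cases hf : pvBFind l with
    | some k =>
      show pvBLoop fuel (List.drop k l) (res + 1) = res + pvF [] l - 1
      obtain ⟨hkpos, hk, hmem, hmin⟩ := pvBFind_some l k hf
      have hstep := pvF_skip k l [] hk (Or.inr hmem)
        (fun j hj => ⟨by simp, hmin j hj (by omega)⟩)
      have hdrop : l.drop k = l[k] :: l.drop (k + 1) := List.drop_eq_getElem_cons hk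
      have h2 : pvF [] (l.drop k) = pvF [l[k]] (l.drop (k + 1)) := by
        rw [hdrop]; simp only [pvF, List.not_mem_nil, if_false]
      rw [ih (l.drop k) (by simp only [List.length_drop]; omega) (res + 1), h2, hstep]
      ring
    | none =>
      show res = res + pvF [] l - 1
      rw [pvF_nodup l [] (fun k hk => ⟨by simp, pvBFind_none l hf k hk⟩)]
      ring

-- ===== VERDICT (by name: the statement is the Claim_ definition above) =====
theorem solution_1664_1_spec : Claim_equal_solution_1664_1 := by
  intro s _
  unfold Spec_solution_1664_1 solution_1664_1 solution_1664_1_alt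
  rw [pvALoop_eq_F s.toList PySem.Set.empty [] 1 (by intro c; simp [PySem.Set.empty]),
      pvBLoop_eq_F s.toList.length s.toList (le_refl _) 1]
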